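-- pv_equiv track=rewrite | github.com/ahmetutkuozkan/my_ceng240_exercises_solutions | 3. Functions/3.9. Exercise Bankruptcy Countdown.py | countdown
-- ===== SOURCE A (Python) =====
-- def countdown(x,y):
--     result=0
--     for i in range(len(y)):
--         if(x>y[i]):
--             result+=1
--             x-=y[i]
--         else:
--             break
--     return result
-- ===== SOURCE B (Python) =====
-- def countdown(x, y):
--     # Prefix-sum decomposition: the running value at step i is x - sum(y[:i]),
--     # so x > y[i] iff the cumulative sum of y[:i+1] stays strictly below the
--     # original x.  Build the prefix-sum sequence, then count its leading run
--     # below x.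
--     sums = []
--     t = 0
--     for v in y:
--         t += v
--         sums.append(t)
--     n = 0
--     while n < len(sums) and sums[n] < x:
--         n += 1
--     return n
-- ===== Notes on version B (the rewrite author's own statement) =====
-- stated objective: alternative
-- what changed: B replaces A's single loop that mutates x and counts with a prefix-sum formulation: it builds the cumulative sums of y once and returns the length of the leading run of sums strictly below the fixed initial x.
import Mathlib
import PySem

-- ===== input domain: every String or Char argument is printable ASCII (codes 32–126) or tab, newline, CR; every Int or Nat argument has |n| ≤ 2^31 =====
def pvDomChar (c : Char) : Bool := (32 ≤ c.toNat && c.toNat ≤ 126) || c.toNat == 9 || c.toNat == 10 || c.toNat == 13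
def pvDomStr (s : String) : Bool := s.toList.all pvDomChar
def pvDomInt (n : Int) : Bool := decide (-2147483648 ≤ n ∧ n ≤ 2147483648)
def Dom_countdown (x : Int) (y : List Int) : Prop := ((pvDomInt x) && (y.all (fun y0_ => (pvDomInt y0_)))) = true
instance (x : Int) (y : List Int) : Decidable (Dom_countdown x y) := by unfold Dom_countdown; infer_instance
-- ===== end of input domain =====

-- B restates A's loop as: build prefix sums of y, count the leading run strictly below x (alternative decomposition, same cost).

-- ===== PORT A =====
-- A's for-loop over range(len(y)) with early break, carrying (x, result):
def countdownGo (x : Int) (ys : List Int) (result : Int) : Int :=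
  match ys with
  | [] => result
  | v :: rest => if x > v then countdownGo (x - v) rest (result + 1) else result

def countdown (x : Int) (y : List Int) : Int := countdownGo x y 0

-- ===== PORT B =====
-- first pass of Source B: the list of cumulative sums, carrying the running total t
def prefixSums (t : Int) (ys : List Int) : List Int :=
  match ys with
  | [] => []
  | v :: rest => (t + v) :: prefixSums (t + v) rest

-- second pass of Source B: length of the leading run of sums strictly below x
def countLeading (x : Int) (sums : List Int) : Int :=
  match sums with
  | [] => 0
  | s :: rest => if s < x then 1 + countLeading x rest else 0

def countdown_alt (x : Int) (y : List Int) : Int := countLeading x (prefixSums 0 y)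

-- ===== PRECONDITION & SPEC =====
def Spec_countdown (x : Int) (y : List Int) (out : Int) : Prop := out = countdown_alt x y
instance (x : Int) (y : List Int) (out : Int) : Decidable (Spec_countdown x y out) := by unfold Spec_countdown; infer_instance

-- ===== CLAIM (what is proved, stated in full; the proofs are below) =====
def Claim_equal_countdown : Prop := ∀ (x : Int) (y : List Int), Dom_countdown x y → Spec_countdown x y (countdown x y)

-- ===== LEMMAS AND PROOFS =====
lemma countdownGo_eq (ys : List Int) :
    ∀ (x t r : Int), countdownGo x ys r = r + countLeading (x + t) (prefixSums t ys) := by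
  induction ys with
  | nil => intro x t r; simp [countdownGo, prefixSums, countLeading]
  | cons v rest ih =>
    intro x t r
    simp only [countdownGo, prefixSums, countLeading]
    by_cases h : x > v
    · rw [if_pos h, if_pos (by omega), ih (x - v) (t + v) (r + 1)]
      ring_nf
    · rw [if_neg h, if_neg (by omega)]
      ring

-- ===== VERDICT (by name: the statement is the Claim_ definition above) =====
theorem countdown_spec : Claim_equal_countdown := by
  intro x y _
  show countdown x y = countdown_alt x y
  have h := countdownGo_eq y x 0 0
  simpa [countdown, countdown_alt] using h
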